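-- pv_equiv track=rewrite | github.com/Said-cmd777/reminder-bot | auto_init_schedules.py | parse_sql_statements
-- ===== SOURCE A (Python) =====
-- def parse_sql_statements(sql_content: str) -> list:
--     """
--     Parse SQL content into individual statements.
--     Handles strings properly to avoid splitting on semicolons inside quotes.
--     Handles SQL comments (-- style) by filtering them out before parsing.
--
--     Args:
--         sql_content: Raw SQL file content
--
--     Returns:
--         List of SQL statements (without trailing semicolons)
--     """
--     # First, remove SQL comments (lines starting with --)
--     lines = sql_content.split('\n')
--     cleaned_lines = []
--     for line in lines:
--         # Remove comment lines but preserve empty lines for readability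
--         if not line.strip().startswith('--'):
--             cleaned_lines.append(line)
--
--     cleaned_content = '\n'.join(cleaned_lines)
--
--     # Now parse statements
--     statements = []
--     current = ""
--     in_string = False
--     string_char = None
--
--     for char in cleaned_content:
--         if char in ('"', "'") and (not in_string or string_char == char):
--             if in_string and string_char == char:
--                 in_string = False
--                 string_char = None
--             elif not in_string:
--                 in_string = True
--                 string_char = char
--
--         current += char
--
--         if char == ';' and not in_string:
--             stmt = current.strip()
--             # Skip empty statements
--             if stmt:
--                 statements.append(stmt[:-1])  # Remove trailing semicolon
--             current = ""
--
--     return statements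
-- ===== SOURCE B (Python) =====
-- def _end_quote(quote, s):
--     """Open-quote character (or None) after scanning s, starting with `quote` open.
--     Works by jumping from quote to quote instead of stepping a per-char state machine."""
--     i, n = 0, len(s)
--     while True:
--         if quote is not None:
--             # inside a string: skip ahead to the closing quote
--             while i < n and s[i] != quote:
--                 i += 1
--             if i == n:
--                 return quote
--             i += 1
--             quote = None
--         # outside any string: advance to the next opening quote
--         while i < n and s[i] != '"' and s[i] != "'":
--             i += 1
--         if i == n:
--             return None
--         quote = s[i]
--         i += 1
--
--
-- def parse_sql_statements(sql_content: str) -> list: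
--     kept = [l for l in sql_content.split('\n') if not l.strip().startswith('--')]
--     cleaned = '\n'.join(kept)
--     parts = cleaned.split(';')
--     statements = []
--     acc = ''
--     quote = None
--     for part in parts[:-1]:
--         quote = _end_quote(quote, part)
--         if quote is None:
--             statements.append((acc + part).lstrip())
--             acc = ''
--         else:
--             acc += part + ';'
--     return statements
-- ===== Notes on version B (the rewrite author's own statement) =====
-- stated objective: faster
-- what changed: Instead of a per-character state machine that grows a `current` string and tracks (in_string, string_char) flags, B splits the cleaned SQL once on the semicolon separator and walks the resulting parts, deciding for each separating semicolon whether it is quoted via a quote-to-quote jumping scanner (skip-to-closing-quote inner loops), re-joining parts only when a semicolon was inside a string.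
import Mathlib
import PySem

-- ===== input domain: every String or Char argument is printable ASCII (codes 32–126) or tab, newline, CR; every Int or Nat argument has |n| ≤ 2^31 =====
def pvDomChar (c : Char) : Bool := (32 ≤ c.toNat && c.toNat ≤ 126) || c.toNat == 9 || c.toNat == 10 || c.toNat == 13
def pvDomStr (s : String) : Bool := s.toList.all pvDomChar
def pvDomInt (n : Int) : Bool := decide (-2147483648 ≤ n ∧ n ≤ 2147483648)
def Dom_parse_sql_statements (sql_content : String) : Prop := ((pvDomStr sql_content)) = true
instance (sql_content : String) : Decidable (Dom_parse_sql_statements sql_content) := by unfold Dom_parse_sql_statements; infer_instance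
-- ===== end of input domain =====

-- B replaces A's per-character (in_string, string_char) state machine by: split once on the semicolon
-- separator, then decide for each separating semicolon whether it is quoted using a quote-to-quote
-- jumping scanner (measured faster by a constant factor: no per-character string growth or flag updates).

-- ===== PORT A =====

-- shared helper: Python str.split with a one-character separator (exact)
def pvSplitChar (sep : Char) : List Char → List (List Char)
  | [] => [[]]
  | c :: cs =>
    if c = sep then [] :: pvSplitChar sep cs
    else match pvSplitChar sep cs with
         | [] => [[c]]
         | p :: ps => (c :: p) :: ps

-- A's loop body: state (statements, current, in_string, string_char), literal transliteration
def pvStepA (st : List String × List Char × Bool × Option Char) (char : Char) :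
    List String × List Char × Bool × Option Char :=
  let statements := st.1
  let current := st.2.1
  let in_string := st.2.2.1
  let string_char := st.2.2.2
  let (in_string, string_char) :=
    if (char = '"' ∨ char = '\'') ∧ (in_string = false ∨ string_char = some char) then
      if in_string = true ∧ string_char = some char then (false, (none : Option Char))
      else if in_string = false then (true, some char)
      else (in_string, string_char)
    else (in_string, string_char)
  let current := current ++ [char]
  if char = ';' ∧ in_string = false then
    let stmt := PySem.Chars.strip current
    let statements :=
      if stmt ≠ [] then
        statements ++ [String.ofList (PySem.List.slice stmt none (some (-1)))]
      else statements
    (statements, ([] : List Char), in_string, string_char)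
  else (statements, current, in_string, string_char)

def parse_sql_statements (sql_content : String) : List String :=
  let lines := pvSplitChar '\n' sql_content.toList
  let cleaned_lines := lines.foldl (fun acc line =>
    if !(PySem.Chars.startswith (PySem.Chars.strip line) ['-', '-']) then acc ++ [line] else acc) []
  let cleaned_content := PySem.Chars.join ['\n'] cleaned_lines
  (cleaned_content.foldl pvStepA (([] : List String), ([] : List Char), false, (none : Option Char))).1

-- ===== PORT B =====

-- _end_quote: the open-quote character (or none) after scanning s, jumping from quote to quote
def endQuote (quote : Option Char) (s : List Char) : Option Char :=
  match quote with
  | some q =>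
    match h : s.dropWhile (fun c => !(c == q)) with
    | [] => some q
    | _ :: rest => endQuote none rest
  | none =>
    match h : s.dropWhile (fun c => !(c == '"' || c == '\'')) with
    | [] => none
    | c :: rest => endQuote (some c) rest
termination_by s.length
decreasing_by
  · have h1 := List.length_dropWhile_le (fun c => !(c == q)) s
    rw [h] at h1; simp at h1; omega
  · have h1 := List.length_dropWhile_le (fun c => !(c == '"' || c == '\'')) s
    rw [h] at h1; simp at h1; omega

-- B's loop body: state (statements, acc, quote)
def pvStepB (st : List String × List Char × Option Char) (part : List Char) :
    List String × List Char × Option Char :=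
  match endQuote st.2.2 part with
  | none => (st.1 ++ [String.ofList (PySem.Chars.lstrip (st.2.1 ++ part))], [], none)
  | some q => (st.1, st.2.1 ++ part ++ [';'], some q)

def parse_sql_statements_alt (sql_content : String) : List String :=
  let kept := (pvSplitChar '\n' sql_content.toList).filter
      (fun l => !(PySem.Chars.startswith (PySem.Chars.strip l) ['-', '-']))
  let cleaned := PySem.Chars.join ['\n'] kept
  let parts := pvSplitChar ';' cleaned
  (parts.dropLast.foldl pvStepB (([] : List String), ([] : List Char), (none : Option Char))).1

-- ===== PRECONDITION & SPEC =====
def Spec_parse_sql_statements (sql_content : String) (out : List String) : Prop := out = parse_sql_statements_alt sql_content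
instance (sql_content : String) (out : List String) : Decidable (Spec_parse_sql_statements sql_content out) := by unfold Spec_parse_sql_statements; infer_instance

-- ===== CLAIM (what is proved, stated in full; the proofs are below) =====
def Claim_equal_parse_sql_statements : Prop := ∀ (sql_content : String), Dom_parse_sql_statements sql_content → Spec_parse_sql_statements sql_content (parse_sql_statements sql_content)

-- ===== LEMMAS AND PROOFS =====

-- the one-character quote state machine both programs implement
def pvQstep (q : Option Char) (c : Char) : Option Char :=
  match q with
  | some qc => if c = qc then none else some qc
  | none => if c = '"' ∨ c = '\'' then some c else none

-- quote states that actually occur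
def pvQOK (q : Option Char) : Prop := q = none ∨ q = some '"' ∨ q = some '\''

-- A's 3-component reduced step (current and quote only; emission simplified)
def pvStepA3 (st : List String × List Char × Option Char) (c : Char) :
    List String × List Char × Option Char :=
  let q := pvQstep st.2.2 c
  if c = ';' ∧ q = none then
    (st.1 ++ [String.ofList (PySem.Chars.lstrip st.2.1)], [], q)
  else (st.1, st.2.1 ++ [c], q)

theorem pvQstep_qok (q : Option Char) (c : Char) (h : pvQOK q) : pvQOK (pvQstep q c) := by
  rcases h with h | h | h <;> subst h <;> simp [pvQstep, pvQOK] <;> tauto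

theorem pvFoldQ_qok (cs : List Char) (q : Option Char) (h : pvQOK q) :
    pvQOK (cs.foldl pvQstep q) := by
  induction cs generalizing q with
  | nil => exact h
  | cons c cs ih => exact ih _ (pvQstep_qok q c h)

theorem pvFoldlConst {α β : Type} (f : β → α → β) (l : List α) (b : β)
    (h : ∀ a ∈ l, f b a = b) : l.foldl f b = b := by
  induction l with
  | nil => rfl
  | cons a l ih =>
    simp only [List.foldl_cons, h a (by simp)]
    exact ih (fun a ha => h a (by simp [ha]))
theorem pvFoldlTake (p : Char → Bool) (q : Option Char) (s : List Char)
    (hp : ∀ c, p c = true → pvQstep q c = q) : (s.takeWhile p).foldl pvQstep q = q :=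
  pvFoldlConst _ _ _ (fun a ha => hp a (List.mem_takeWhile_imp ha))
theorem pvDropWhileHead {p : Char → Bool} {s rest : List Char} {c : Char}
    (h : s.dropWhile p = c :: rest) : p c = false := by
  induction s with
  | nil => simp [List.dropWhile] at h
  | cons a s ih =>
    rw [List.dropWhile_cons] at h
    split_ifs at h with hp
    · exact ih h
    · injection h with h1 h2; subst h1; simpa using hp

theorem endQuote_eq_fold (quote : Option Char) (s : List Char) :
    endQuote quote s = s.foldl pvQstep quote := by
  fun_induction endQuote quote s with
  | case1 s q h =>
    conv_rhs => rw [← List.takeWhile_append_dropWhile (p := fun c => !(c == q)) (l := s), h]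
    simp only [List.foldl_append, List.foldl_nil]
    rw [pvFoldlTake]
    intro c hc; simp at hc; simp [pvQstep, hc]
  | case2 s q hd rest h ih =>
    conv_rhs => rw [← List.takeWhile_append_dropWhile (p := fun c => !(c == q)) (l := s), h]
    have hdq : hd = q := by simpa using pvDropWhileHead h
    simp only [List.foldl_append, List.foldl_cons]
    rw [pvFoldlTake]
    · subst hdq; simp [pvQstep, ih]
    · intro c hc; simp at hc; simp [pvQstep, hc]
  | case3 s h =>
    conv_rhs => rw [← List.takeWhile_append_dropWhile
      (p := fun c => !(c == '"' || c == '\'')) (l := s), h]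
    simp only [List.foldl_append, List.foldl_nil]
    rw [pvFoldlTake]
    intro c hc; simp at hc; simp [pvQstep, hc]
  | case4 s c rest h ih =>
    conv_rhs => rw [← List.takeWhile_append_dropWhile
      (p := fun c => !(c == '"' || c == '\'')) (l := s), h]
    have hcq : c = '"' ∨ c = '\'' := or_iff_not_imp_left.mpr (by simpa using pvDropWhileHead h)
    simp only [List.foldl_append, List.foldl_cons]
    rw [pvFoldlTake]
    · simp [pvQstep, hcq, ih]
    · intro c hc; simp at hc; simp [pvQstep, hc]

-- stmt[:-1] is dropLast
theorem pvSlice_neg_one (xs : List Char) : PySem.List.slice xs none (some (-1)) = xs.dropLast := by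
  have := PySem.Str.slice_to_neg_one (String.ofList xs)
  simpa using this

theorem pvLstrip_append_semi (xs : List Char) :
    PySem.Chars.lstrip (xs ++ [';']) = PySem.Chars.lstrip xs ++ [';'] := by
  have hs : PySem.Chars.isspace ';' = false := by decide
  simp only [PySem.Chars.lstrip, List.dropWhile_append]
  split_ifs with h
  · simp only [List.isEmpty_iff] at h
    simp [h, List.dropWhile, hs]
  · rfl

theorem pvStrip_append_semi (xs : List Char) :
    PySem.Chars.strip (xs ++ [';']) = PySem.Chars.lstrip xs ++ [';'] := by
  have hs : PySem.Chars.isspace ';' = false := by decide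
  simp only [PySem.Chars.strip, pvLstrip_append_semi]
  simp [PySem.Chars.rstrip, hs]

-- A's literal step is the reduced step, through the invariant in_string = quote.isSome
theorem pvStepA_eq (stmts : List String) (cur : List Char) (q : Option Char) (c : Char)
    (hq : pvQOK q) :
    pvStepA (stmts, cur, q.isSome, q) c =
      ((pvStepA3 (stmts, cur, q) c).1, (pvStepA3 (stmts, cur, q) c).2.1,
       (pvStepA3 (stmts, cur, q) c).2.2.isSome, (pvStepA3 (stmts, cur, q) c).2.2) := by
  rcases hq with h | h | h <;> subst h <;>
    simp only [pvStepA, pvStepA3, pvQstep, Option.isSome] <;>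
    by_cases h1 : c = '"' <;> by_cases h2 : c = '\'' <;> by_cases h3 : c = ';' <;>
    simp_all [pvStrip_append_semi, pvSlice_neg_one]

theorem pvFoldA_eq (cs : List Char) (stmts : List String) (cur : List Char) (q : Option Char)
    (hq : pvQOK q) :
    cs.foldl pvStepA (stmts, cur, q.isSome, q) =
      ((cs.foldl pvStepA3 (stmts, cur, q)).1, (cs.foldl pvStepA3 (stmts, cur, q)).2.1,
       (cs.foldl pvStepA3 (stmts, cur, q)).2.2.isSome, (cs.foldl pvStepA3 (stmts, cur, q)).2.2) := by
  induction cs generalizing stmts cur q with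
  | nil => rfl
  | cons c cs ih =>
    have hq' : pvQOK (pvQstep q c) := pvQstep_qok q c hq
    simp only [List.foldl_cons, pvStepA_eq stmts cur q c hq]
    have : pvQOK (pvStepA3 (stmts, cur, q) c).2.2 := by
      simp only [pvStepA3]
      split_ifs <;> exact hq'
    rw [ih _ _ _ this]

-- A's fold over a semicolon-free block only accumulates and steps the quote state
theorem pvFoldA3_free (part : List Char) (stmts : List String) (cur : List Char) (q : Option Char)
    (hfree : ';' ∉ part) :
    part.foldl pvStepA3 (stmts, cur, q) = (stmts, cur ++ part, part.foldl pvQstep q) := by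
  induction part generalizing cur q with
  | nil => simp
  | cons c cs ih =>
    have hc : c ≠ ';' := fun h => hfree (h ▸ List.mem_cons_self)
    simp only [List.foldl_cons]
    rw [show pvStepA3 (stmts, cur, q) c = (stmts, cur ++ [c], pvQstep q c) by
      simp [pvStepA3, hc]]
    rw [ih _ _ (fun h => hfree (List.mem_cons_of_mem _ h))]
    simp

-- the central correspondence: A's char fold over the ';'-interleaving of the parts
-- produces the same statements as B's fold over all parts but the last
theorem pvMain (parts : List (List Char)) (stmts : List String) (acc : List Char) (q : Option Char)
    (hq : pvQOK q) (hne : parts ≠ []) (hfree : ∀ p ∈ parts, ';' ∉ p) :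
    (List.foldl pvStepA3 (stmts, acc, q) (List.intercalate [';'] parts)).1 =
      (List.foldl pvStepB (stmts, acc, q) parts.dropLast).1 := by
  induction parts generalizing stmts acc q with
  | nil => exact absurd rfl hne
  | cons p ps ih =>
    cases ps with
    | nil =>
      simp only [List.intercalate, List.intersperse, List.flatten, List.dropLast, List.foldl_nil]
      rw [List.append_eq, List.append_nil, pvFoldA3_free p stmts acc q (hfree p (by simp))]
    | cons p2 ps2 =>
      have hstep : List.intercalate [';'] (p :: p2 :: ps2) =
          p ++ [';'] ++ List.intercalate [';'] (p2 :: ps2) := by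
        simp [List.intercalate, List.intersperse]
      rw [hstep, List.foldl_append, List.foldl_append,
        pvFoldA3_free p stmts acc q (hfree p (by simp))]
      have hq1 : pvQOK (p.foldl pvQstep q) := pvFoldQ_qok p q hq
      have hsemi : pvQstep (p.foldl pvQstep q) ';' = p.foldl pvQstep q := by
        rcases hq1 with h | h | h <;> rw [h] <;> simp [pvQstep]
      have hdrop : (p :: p2 :: ps2).dropLast = p :: (p2 :: ps2).dropLast := by simp
      rw [hdrop, List.foldl_cons]
      have hB : pvStepB (stmts, acc, q) p =
          if p.foldl pvQstep q = none then
            (stmts ++ [String.ofList (PySem.Chars.lstrip (acc ++ p))], [], none)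
          else (stmts, acc ++ p ++ [';'], p.foldl pvQstep q) := by
        simp only [pvStepB, endQuote_eq_fold]
        rcases hq1 with h | h | h <;> rw [h] <;> simp
      rcases hq1 with h | h | h
      · -- the separating semicolon is outside any string: A emits here
        rw [List.foldl_cons]
        have hA : pvStepA3 (stmts, acc ++ p, p.foldl pvQstep q) ';' =
            (stmts ++ [String.ofList (PySem.Chars.lstrip (acc ++ p))], [], none) := by
          simp [pvStepA3, pvQstep, h]
        rw [hA, hB, if_pos h]
        exact ih _ _ _ (Or.inl rfl) (by simp) (fun x hx => hfree x (List.mem_cons_of_mem _ hx))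
      all_goals {
        rw [List.foldl_cons]
        have hA : pvStepA3 (stmts, acc ++ p, p.foldl pvQstep q) ';' =
            (stmts, acc ++ p ++ [';'], p.foldl pvQstep q) := by
          simp [pvStepA3, pvQstep, h]
        rw [hA, hB, if_neg (by simp [h])]
        exact ih _ _ _ (by rw [h]; simp [pvQOK]) (by simp)
          (fun x hx => hfree x (List.mem_cons_of_mem _ hx))
      }

-- pvSplitChar is an exact inverse of intercalate, with semicolon-free nonempty parts
theorem pvSplitChar_ne_nil (sep : Char) (s : List Char) : pvSplitChar sep s ≠ [] := by
  induction s with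
  | nil => simp [pvSplitChar]
  | cons c cs ih =>
    simp only [pvSplitChar]
    split_ifs
    · simp
    · cases h : pvSplitChar sep cs <;> simp

theorem pvSplitChar_free (sep : Char) (s : List Char) :
    ∀ p ∈ pvSplitChar sep s, sep ∉ p := by
  induction s with
  | nil => intro p hp; simp [pvSplitChar] at hp; simp [hp]
  | cons c cs ih =>
    intro p hp
    by_cases hc : c = sep
    · simp only [pvSplitChar, if_pos hc] at hp
      rcases List.mem_cons.mp hp with hp | hp
      · simp [hp]
      · exact ih p hp
    · cases h : pvSplitChar sep cs with
      | nil => exact absurd h (pvSplitChar_ne_nil sep cs)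
      | cons p0 ps =>
        simp only [pvSplitChar, if_neg hc, h] at hp
        rcases List.mem_cons.mp hp with hp | hp
        · subst hp
          intro hmem
          rcases List.mem_cons.mp hmem with h1 | h1
          · exact hc h1.symm
          · exact ih p0 (h ▸ List.mem_cons_self) h1
        · exact ih p (h ▸ List.mem_cons_of_mem _ hp)

theorem pvSplitChar_intercalate (sep : Char) (s : List Char) :
    List.intercalate [sep] (pvSplitChar sep s) = s := by
  induction s with
  | nil => simp [pvSplitChar, List.intercalate]
  | cons c cs ih =>
    simp only [pvSplitChar]
    split_ifs with hc
    · subst hc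
      cases h : pvSplitChar c cs with
      | nil => exact absurd h (pvSplitChar_ne_nil c cs)
      | cons p ps =>
        rw [← ih, h]
        simp [List.intercalate, List.intersperse]
    · cases h : pvSplitChar sep cs with
      | nil => exact absurd h (pvSplitChar_ne_nil sep cs)
      | cons p ps =>
        rw [← ih, h]
        cases ps with
        | nil => simp [List.intercalate, List.intersperse]
        | cons p2 ps2 => simp [List.intercalate, List.intersperse]

-- ===== VERDICT (by name: the statement is the Claim_ definition above) =====
theorem parse_sql_statements_spec : Claim_equal_parse_sql_statements := by
  intro sql_content _
  show parse_sql_statements sql_content = parse_sql_statements_alt sql_content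
  unfold parse_sql_statements parse_sql_statements_alt
  simp only [PySem.List.foldl_append_if_eq_filter
    (fun l => !(PySem.Chars.startswith (PySem.Chars.strip l) ['-', '-']))
    (pvSplitChar '\n' sql_content.toList) [], List.nil_append]
  set cleaned := PySem.Chars.join ['\n']
    ((pvSplitChar '\n' sql_content.toList).filter
      (fun l => !(PySem.Chars.startswith (PySem.Chars.strip l) ['-', '-']))) with hcl
  rw [show (([] : List String), ([] : List Char), false, (none : Option Char)) =
      (([] : List String), ([] : List Char), (none : Option Char).isSome, (none : Option Char)) by simp]
  rw [pvFoldA_eq cleaned [] [] none (Or.inl rfl)]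
  have := pvMain (pvSplitChar ';' cleaned) [] [] none (Or.inl rfl)
    (pvSplitChar_ne_nil ';' cleaned) (pvSplitChar_free ';' cleaned)
  rw [pvSplitChar_intercalate ';' cleaned] at this
  exact this
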